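-- pv_equiv track=rewrite | github.com/berquist/obara-saika | shell.py | get_shell4
-- ===== SOURCE A (Python) =====
-- def get_ijk_list(m):
--     """
--     Form all possible (i, j, k) exponents up to maximum total angular momentum m.
--     """
--     l = []
--     for a in range(1, m + 2):
--         for b in range(1, a + 1):
--             i = m + 1 - a
--             j = a - b
--             k = b - 1
--             l.append([i, j, k])
--     return l
--
-- def get_shell4(a, b, c, d):
--     """
--     Form all possible angular momentum combinations up to lmax = a, b, c, d
--     for center 1, 2, 3, and 4, respectively.
--     """
--     components = []
--     for p in get_ijk_list(a):
--         for q in get_ijk_list(b):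
--             for r in get_ijk_list(c):
--                 for s in get_ijk_list(d):
--                     components.append(p + q + r + s)
--     return components
-- ===== SOURCE B (Python) =====
-- def get_ijk_list(m):
--     """All (i, j, k) exponent triples up to total angular momentum m, as one flat comprehension."""
--     return [[m + 1 - a, a - b, b - 1] for a in range(1, m + 2) for b in range(1, a + 1)]
--
--
-- def get_shell4(a, b, c, d):
--     """Cartesian product built incrementally: thread one growing accumulator of
--     partial concatenations through the four component lists instead of four
--     fixed nested loops; stop as soon as the product is known to be empty."""
--     acc = [[]]
--     for m in (a, b, c, d):
--         if not acc:
--             return []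
--         lst = get_ijk_list(m)
--         acc = [partial + comp for partial in acc for comp in lst]
--     return acc
-- ===== Notes on version B (the rewrite author's own statement) =====
-- stated objective: alternative
-- what changed: The four fixed nested loops (plus the helper's append loops) are replaced by a fold that threads one growing accumulator of partial concatenations through the four component lists, exiting early once the product is empty; the helper becomes a single flat comprehension.
import Mathlib
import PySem

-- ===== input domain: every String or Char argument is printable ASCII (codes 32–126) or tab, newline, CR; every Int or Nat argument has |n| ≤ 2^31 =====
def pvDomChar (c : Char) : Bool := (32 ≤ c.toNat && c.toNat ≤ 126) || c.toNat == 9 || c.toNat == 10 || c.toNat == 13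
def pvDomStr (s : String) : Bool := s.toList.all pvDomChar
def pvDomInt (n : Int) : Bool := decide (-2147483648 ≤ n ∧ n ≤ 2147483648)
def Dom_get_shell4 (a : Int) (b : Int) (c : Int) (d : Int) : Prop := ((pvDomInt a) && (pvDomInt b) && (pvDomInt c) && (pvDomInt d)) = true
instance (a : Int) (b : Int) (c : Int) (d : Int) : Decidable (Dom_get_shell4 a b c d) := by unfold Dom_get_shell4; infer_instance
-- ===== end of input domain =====

-- B builds the same product by threading one accumulator of partial concatenations
-- through the four component lists (fold) instead of four fixed nested loops; same values.
-- ===== PORT A =====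
def get_ijk_list (m : Int) : List (List Int) :=
  (PySem.List.pyRange 1 (m + 2) 1).foldl (fun l a =>
    (PySem.List.pyRange 1 (a + 1) 1).foldl (fun l b =>
      l ++ [[m + 1 - a, a - b, b - 1]]) l) []

def get_shell4 (a : Int) (b : Int) (c : Int) (d : Int) : List (List Int) :=
  (get_ijk_list a).foldl (fun comps p =>
    (get_ijk_list b).foldl (fun comps q =>
      (get_ijk_list c).foldl (fun comps r =>
        (get_ijk_list d).foldl (fun comps s =>
          comps ++ [p ++ q ++ r ++ s]) comps) comps) comps) []

-- ===== PORT B =====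
def get_ijk_list_alt (m : Int) : List (List Int) :=
  (PySem.List.pyRange 1 (m + 2) 1).flatMap (fun a =>
    (PySem.List.pyRange 1 (a + 1) 1).map (fun b => [m + 1 - a, a - b, b - 1]))

def shellGo (acc : List (List Int)) : List Int → List (List Int)
  | [] => acc
  | m :: ms =>
      if acc = [] then []
      else shellGo (acc.flatMap (fun partial_ => (get_ijk_list_alt m).map (fun comp => partial_ ++ comp))) ms

def get_shell4_alt (a : Int) (b : Int) (c : Int) (d : Int) : List (List Int) :=
  shellGo [[]] [a, b, c, d]

-- ===== PRECONDITION & SPEC =====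
def Spec_get_shell4 (a : Int) (b : Int) (c : Int) (d : Int) (out : List (List Int)) : Prop := out = get_shell4_alt a b c d
instance (a : Int) (b : Int) (c : Int) (d : Int) (out : List (List Int)) : Decidable (Spec_get_shell4 a b c d out) := by unfold Spec_get_shell4; infer_instance

-- ===== CLAIM (what is proved, stated in full; the proofs are below) =====
def Claim_equal_get_shell4 : Prop := ∀ (a : Int) (b : Int) (c : Int) (d : Int), Dom_get_shell4 a b c d → Spec_get_shell4 a b c d (get_shell4 a b c d)

-- ===== LEMMAS AND PROOFS =====

lemma ijk_eq (m : Int) : get_ijk_list m = get_ijk_list_alt m := by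
  unfold get_ijk_list get_ijk_list_alt
  simp only [PySem.List.foldl_append_singleton_eq_map, PySem.List.foldl_append_eq_flatMap,
    List.nil_append]

lemma alt_closed (a b c d : Int) :
    get_shell4_alt a b c d =
      (get_ijk_list_alt a).flatMap (fun p =>
        (get_ijk_list_alt b).flatMap (fun q =>
          (get_ijk_list_alt c).flatMap (fun r =>
            (get_ijk_list_alt d).map (fun s => p ++ (q ++ (r ++ s)))))) := by
  have hnil : ∀ ms : List Int,
      ms.foldl (fun acc m =>
        acc.flatMap (fun partial_ => (get_ijk_list_alt m).map (fun comp => partial_ ++ comp)))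
        ([] : List (List Int)) = [] := by
    intro ms; induction ms with
    | nil => rfl
    | cons m ms ih => simp [ih]
  have hgo : ∀ (ms : List Int) (acc : List (List Int)),
      shellGo acc ms =
        ms.foldl (fun acc m =>
          acc.flatMap (fun partial_ => (get_ijk_list_alt m).map (fun comp => partial_ ++ comp))) acc := by
    intro ms; induction ms with
    | nil => intro acc; rfl
    | cons m ms ih =>
        intro acc
        by_cases h : acc = []
        · subst h; simpa [shellGo, hnil ms] using (hnil (m :: ms)).symm
        · simp [shellGo, h, ih]
  unfold get_shell4_alt
  rw [hgo]
  simp only [List.foldl_cons, List.foldl_nil, List.flatMap_cons, List.flatMap_nil,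
    List.append_nil, List.nil_append, List.map_id', List.flatMap_assoc, List.flatMap_map, List.append_assoc]

lemma a_closed (a b c d : Int) :
    get_shell4 a b c d =
      (get_ijk_list_alt a).flatMap (fun p =>
        (get_ijk_list_alt b).flatMap (fun q =>
          (get_ijk_list_alt c).flatMap (fun r =>
            (get_ijk_list_alt d).map (fun s => p ++ (q ++ (r ++ s)))))) := by
  unfold get_shell4
  simp only [ijk_eq, PySem.List.foldl_append_singleton_eq_map,
    PySem.List.foldl_append_eq_flatMap, List.nil_append, List.append_assoc]

-- ===== VERDICT (by name: the statement is the Claim_ definition above) =====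
theorem get_shell4_spec : Claim_equal_get_shell4 := by
  intro a b c d _
  unfold Spec_get_shell4
  exact (a_closed a b c d).trans (alt_closed a b c d).symm
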